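-- pv_equiv track=rewrite | github.com/Kishore-AG/speech-rag-lecture-qa | src/preprocess.py | build_raw_chunks
-- ===== SOURCE A (Python) =====
-- def build_raw_chunks(sentences, boundaries):
--     """Build chunks from sentence boundaries."""
--     boundary_set = set(boundaries)
--     chunks, current = [], []
--     for i, sent in enumerate(sentences):
--         current.append(sent)
--         if i in boundary_set:
--             chunks.append(" ".join(current))
--             current = []
--     if current:
--         chunks.append(" ".join(current))
--     return chunks
-- ===== SOURCE B (Python) =====
-- def build_raw_chunks(sentences, boundaries):
--     """Build chunks from sentence boundaries."""
--     n = len(sentences)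
--     cuts = sorted({b for b in boundaries if 0 <= b < n})
--     chunks = []
--     start = 0
--     for c in cuts:
--         chunks.append(" ".join(sentences[start:c + 1]))
--         start = c + 1
--     if start < n:
--         chunks.append(" ".join(sentences[start:]))
--     return chunks
-- ===== Notes on version B (the rewrite author's own statement) =====
-- stated objective: faster
-- what changed: Instead of scanning every sentence, testing its index against the boundary set and growing a current buffer, B computes the sorted in-range cut indices up front and emits each chunk as one slice join between consecutive cuts.
import Mathlib
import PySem

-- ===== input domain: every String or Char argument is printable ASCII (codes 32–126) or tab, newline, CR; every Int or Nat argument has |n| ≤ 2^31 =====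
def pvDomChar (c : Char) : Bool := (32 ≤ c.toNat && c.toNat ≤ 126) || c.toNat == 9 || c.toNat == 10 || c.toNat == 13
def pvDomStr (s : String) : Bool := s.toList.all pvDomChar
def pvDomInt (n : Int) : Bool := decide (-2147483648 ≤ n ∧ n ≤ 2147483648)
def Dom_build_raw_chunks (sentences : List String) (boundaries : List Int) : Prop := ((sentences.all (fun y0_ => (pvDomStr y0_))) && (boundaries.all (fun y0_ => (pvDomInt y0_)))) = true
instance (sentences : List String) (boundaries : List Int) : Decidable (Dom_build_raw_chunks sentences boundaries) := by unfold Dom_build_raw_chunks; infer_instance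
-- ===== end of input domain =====

-- B replaces A's per-sentence membership scan with slicing between precomputed sorted cut indices (different decomposition; a timing run measured it faster by a constant factor).

-- ===== PORT A =====
def build_raw_chunks (sentences : List String) (boundaries : List Int) : List String :=
  let boundary_set : PySem.Set Int := PySem.Set.ofList boundaries
  let st := (PySem.List.enumerate sentences).foldl
    (fun (st : List String × List String) (p : Int × String) =>
      let current := st.2 ++ [p.2]
      if PySem.Set.contains boundary_set p.1 then
        (st.1 ++ [PySem.Str.join " " current], [])
      else (st.1, current)) ([], [])
  if st.2 ≠ [] then st.1 ++ [PySem.Str.join " " st.2] else st.1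

-- ===== PORT B =====
-- the 'for c in cuts' loop of Source B, carrying the running start index
def bAltGo (sentences : List String) : List Int → Int → List String
  | [], start =>
      if start < (sentences.length : Int) then
        [PySem.Str.join " " (PySem.List.slice sentences (some start) none)]
      else []
  | c :: cs, start =>
      PySem.Str.join " " (PySem.List.slice sentences (some start) (some (c + 1)))
        :: bAltGo sentences cs (c + 1)

def build_raw_chunks_alt (sentences : List String) (boundaries : List Int) : List String :=
  let n : Int := sentences.length
  let cuts := PySem.List.sorted
    (PySem.Set.ofList (boundaries.filter (fun b => decide (0 ≤ b) && decide (b < n))))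
    (fun x => x) false
  bAltGo sentences cuts 0

-- ===== PRECONDITION & SPEC =====
def Spec_build_raw_chunks (sentences : List String) (boundaries : List Int) (out : List String) : Prop := out = build_raw_chunks_alt sentences boundaries
instance (sentences : List String) (boundaries : List Int) (out : List String) : Decidable (Spec_build_raw_chunks sentences boundaries out) := by unfold Spec_build_raw_chunks; infer_instance

-- ===== CLAIM (what is proved, stated in full; the proofs are below) =====
def Claim_equal_build_raw_chunks : Prop := ∀ (sentences : List String) (boundaries : List Int), Dom_build_raw_chunks sentences boundaries → Spec_build_raw_chunks sentences boundaries (build_raw_chunks sentences boundaries)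

-- ===== LEMMAS AND PROOFS =====

-- A's loop as a structural recursion (proved equal to the foldl below)
def aGo (S : PySem.Set Int) : List String → Int → List String → List String
  | [], _, cur => if cur ≠ [] then [PySem.Str.join " " cur] else []
  | s :: rest, i, cur =>
      let cur' := cur ++ [s]
      if PySem.Set.contains S i then
        PySem.Str.join " " cur' :: aGo S rest (i + 1) []
      else aGo S rest (i + 1) cur'

theorem aGo_eq_fold (S : PySem.Set Int) (l : List String) (i : Int)
    (cur acc : List String) :
    (let st := (PySem.List.enumerate l i).foldl
        (fun (st : List String × List String) (p : Int × String) =>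
          let current := st.2 ++ [p.2]
          if PySem.Set.contains S p.1 then
            (st.1 ++ [PySem.Str.join " " current], [])
          else (st.1, current)) (acc, cur)
      if st.2 ≠ [] then st.1 ++ [PySem.Str.join " " st.2] else st.1)
    = acc ++ aGo S l i cur := by
  induction l generalizing i cur acc with
  | nil =>
      simp only [PySem.List.enumerate_nil, List.foldl_nil, aGo]
      by_cases h : cur = [] <;> simp [h]
  | cons s rest ih =>
      simp only [PySem.List.enumerate_cons, List.foldl_cons, aGo]
      by_cases h : PySem.Set.contains S i = true
      · simp only [h, if_pos]
        rw [ih]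
        simp
      · simp only [h, if_neg, Bool.false_eq_true, not_false_iff]
        rw [ih]

-- skipping a run of non-boundary indices just accumulates it into `cur`
theorem aGo_skip (S : PySem.Set Int) (pre rest : List String) (i : Int)
    (cur : List String)
    (h : ∀ k : Nat, k < pre.length → PySem.Set.contains S (i + k) = false) :
    aGo S (pre ++ rest) i cur = aGo S rest (i + pre.length) (cur ++ pre) := by
  induction pre generalizing i cur with
  | nil => simp
  | cons s pre ih =>
      have h0 : PySem.Set.contains S i = false := by
        have := h 0 (by simp)
        simpa using this
      simp only [List.cons_append, aGo, h0, Bool.false_eq_true, if_neg,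
        not_false_iff]
      rw [ih (i + 1) (cur ++ [s]) (fun k hk => by
        have := h (k + 1) (by simpa using Nat.succ_lt_succ hk)
        convert this using 2
        push_cast; ring)]
      simp only [List.append_assoc, List.singleton_append, List.length_cons]
      congr 1
      push_cast; ring

-- main invariant: from index `start` with empty buffer, A's loop produces B's walk
theorem aGo_eq_bAltGo (sentences : List String) (S : PySem.Set Int)
    (cuts : List Int) :
    ∀ (start : Int), 0 ≤ start →
    cuts.Pairwise (· < ·) →
    (∀ c ∈ cuts, start ≤ c ∧ c < (sentences.length : Int)) →
    (∀ i : Int, start ≤ i → i < (sentences.length : Int) →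
        (PySem.Set.contains S i = true ↔ i ∈ cuts)) →
    aGo S (sentences.drop start.toNat) start [] = bAltGo sentences cuts start := by
  induction cuts with
  | nil =>
      intro start hs _ _ hmem
      have hnone : ∀ k : Nat, k < (sentences.drop start.toNat).length →
          PySem.Set.contains S (start + k) = false := by
        intro k hk
        have hlen : start.toNat + k < sentences.length := by
          simp only [List.length_drop] at hk; omega
        have h1 : start + (k : Int) < (sentences.length : Int) := by omega
        have h2 : start ≤ start + (k : Int) := by omega
        have := hmem _ h2 h1
        simp only [List.not_mem_nil, iff_false] at this
        exact Bool.eq_false_iff.mpr this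
      have := aGo_skip S (sentences.drop start.toNat) [] start [] hnone
      simp only [List.append_nil, List.nil_append] at this
      rw [this]
      simp only [aGo, bAltGo]
      have hslice : PySem.List.slice sentences (some start) none
          = sentences.drop start.toNat := by
        conv_lhs => rw [show start = ((start.toNat : Nat) : Int) by omega]
        rw [PySem.List.slice_from_natCast]
      rw [hslice]
      by_cases h : start < (sentences.length : Int)
      · have : sentences.drop start.toNat ≠ [] := by
          intro hE
          have := List.drop_eq_nil_iff.mp hE
          omega
        simp [h, this]
      · have : sentences.drop start.toNat = [] := by
          apply List.drop_eq_nil_of_le; omega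
        simp [h, this]
  | cons c cs ih =>
      intro start hs hp hrange hmem
      obtain ⟨hsc, hcn⟩ := hrange c (by simp)
      have hc0 : 0 ≤ c := le_trans hs hsc
      -- decompose the suffix at index c
      have hctlt : c.toNat < sentences.length := by omega
      have hsplit : sentences.drop start.toNat
          = ((sentences.drop start.toNat).take (c.toNat - start.toNat))
            ++ (sentences[c.toNat] :: sentences.drop (c.toNat + 1)) := by
        conv_lhs => rw [← List.take_append_drop (c.toNat - start.toNat)
          (sentences.drop start.toNat)]
        congr 1
        rw [List.drop_drop]
        have h1 : start.toNat + (c.toNat - start.toNat) = c.toNat := by omega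
        rw [h1]
        exact List.drop_eq_getElem_cons hctlt
      set pre := (sentences.drop start.toNat).take (c.toNat - start.toNat) with hpre
      have hprelen : pre.length = c.toNat - start.toNat := by
        simp only [hpre, List.length_take, List.length_drop]
        omega
      have hskip : ∀ k : Nat, k < pre.length →
          PySem.Set.contains S (start + k) = false := by
        intro k hk
        rw [hprelen] at hk
        have h1 : start ≤ start + (k : Int) := by omega
        have h2 : start + (k : Int) < (sentences.length : Int) := by omega
        have h3 : start + (k : Int) < c := by omega
        have := hmem _ h1 h2
        apply Bool.eq_false_iff.mpr
        intro hcon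
        have hin := this.mp hcon
        rcases List.mem_cons.mp hin with h | h
        · omega
        · have := (List.pairwise_cons.mp hp).1 _ h
          omega
      rw [hsplit, aGo_skip S pre _ start [] hskip]
      have hidx : start + (pre.length : Int) = c := by
        rw [hprelen]; omega
      rw [hidx]
      have hcontc : PySem.Set.contains S c = true :=
        (hmem c hsc hcn).mpr (by simp)
      simp only [aGo, hcontc, if_pos, List.nil_append]
      -- the emitted chunk is exactly the slice sentences[start:c+1]
      have hslice : PySem.List.slice sentences (some start) (some (c + 1))
          = pre ++ [sentences[c.toNat]] := by
        conv_lhs => rw [show start = ((start.toNat : Nat) : Int) by omega,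
          show c + 1 = (((c.toNat + 1) : Nat) : Int) by omega]
        rw [PySem.List.slice_natCast]
        rw [show c.toNat + 1 - start.toNat = (c.toNat - start.toNat) + 1 by omega]
        rw [← List.take_concat_get (l := sentences.drop start.toNat)
          (i := c.toNat - start.toNat) (by simp only [List.length_drop]; omega)]
        rw [← hpre]
        simp only [List.concat_eq_append, List.getElem_drop]
        congr 2
        simp only [show start.toNat + (c.toNat - start.toNat) = c.toNat from by omega]
      rw [bAltGo, hslice]
      congr 1
      have htail : sentences.drop (c.toNat + 1) = sentences.drop (c + 1).toNat := by
        congr 1; omega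
      rw [htail]
      apply ih (c + 1) (by omega) (List.Pairwise.of_cons hp)
      · intro c' hc'
        have := (List.pairwise_cons.mp hp).1 _ hc'
        have := (hrange c' (by simp [hc'])).2
        omega
      · intro i h1 h2
        rw [hmem i (by omega) h2]
        constructor
        · intro h
          rcases List.mem_cons.mp h with h | h
          · omega
          · exact h
        · intro h
          exact List.mem_cons.mpr (Or.inr h)

-- ===== VERDICT (by name: the statement is the Claim_ definition above) =====
theorem build_raw_chunks_spec : Claim_equal_build_raw_chunks := by
  intro sentences boundaries _
  unfold Spec_build_raw_chunks build_raw_chunks build_raw_chunks_alt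
  rw [aGo_eq_fold]
  simp only [List.nil_append]
  have h := aGo_eq_bAltGo sentences (PySem.Set.ofList boundaries)
    (PySem.List.sorted
      (PySem.Set.ofList (boundaries.filter
        (fun b => decide (0 ≤ b) && decide (b < (sentences.length : Int)))))
      (fun x => x) false)
    0 le_rfl
    (PySem.List.sorted_ofList_pairwise_lt _)
    (by
      intro c hc
      rw [PySem.List.mem_sorted, PySem.Set.mem_ofList, List.mem_filter] at hc
      simp only [Bool.and_eq_true, decide_eq_true_eq] at hc
      exact ⟨hc.2.1, hc.2.2⟩)
    (by
      intro i h0 hn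
      rw [PySem.List.mem_sorted, PySem.Set.mem_ofList, List.mem_filter]
      simp only [Bool.and_eq_true, decide_eq_true_eq]
      constructor
      · intro h
        exact ⟨(PySem.Set.mem_ofList _ _).mp ((PySem.Set.contains_iff _ _).mp h), h0, hn⟩
      · intro h
        exact (PySem.Set.contains_iff _ _).mpr ((PySem.Set.mem_ofList _ _).mpr h.1))
  simpa using h
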